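-- pv_equiv track=rewrite | github.com/NNroc/pyutils | test/bioecr.py | pos2sents_id
-- ===== SOURCE A (Python) =====
-- def pos2sents_id(sents, pos_id):
--     sent_id = 0
--     sent_pos_id = pos_id
--     for sent in sents:
--         if sent_pos_id >= len(sent):
--             sent_id += 1
--             sent_pos_id -= len(sent)
--         else:
--             break
--     return sent_id, sent_pos_id
-- ===== SOURCE B (Python) =====
-- def pos2sents_id(sents, pos_id):
--     # prefix-sum table + hand-rolled binary search (bisect_right) instead of a linear scan
--     P = [0]
--     for s in sents:
--         P.append(P[-1] + len(s))
--     lo, hi = 0, len(P)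
--     while lo < hi:
--         mid = (lo + hi) // 2
--         if pos_id < P[mid]:
--             hi = mid
--         else:
--             lo = mid + 1
--     idx = max(lo - 1, 0)
--     return idx, pos_id - P[idx]
-- ===== Notes on version B (the rewrite author's own statement) =====
-- stated objective: alternative
-- what changed: Replaced the linear subtraction loop with a prefix-sum table built once plus a binary search (bisect_right) for the sentence index, clamping the index to 0 so negative positions behave like A.
import Mathlib
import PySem

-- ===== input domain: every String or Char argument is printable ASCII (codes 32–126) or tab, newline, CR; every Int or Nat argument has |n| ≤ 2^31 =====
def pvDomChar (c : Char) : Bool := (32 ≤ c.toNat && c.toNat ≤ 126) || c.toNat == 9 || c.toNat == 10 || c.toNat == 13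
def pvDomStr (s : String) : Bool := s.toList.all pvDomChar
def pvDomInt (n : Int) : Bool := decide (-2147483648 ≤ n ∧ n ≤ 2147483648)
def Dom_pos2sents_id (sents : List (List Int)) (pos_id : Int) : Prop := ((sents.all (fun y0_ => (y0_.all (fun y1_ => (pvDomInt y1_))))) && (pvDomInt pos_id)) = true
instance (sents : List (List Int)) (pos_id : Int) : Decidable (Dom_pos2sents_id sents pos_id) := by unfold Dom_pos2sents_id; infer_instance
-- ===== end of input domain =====

-- B replaces A's linear subtraction loop by a prefix-sum table plus binary search (alternative algorithm).

-- ===== PORT A =====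
-- the for-loop of A, carrying (sent_id, sent_pos_id)
def pos2sents_id_go (sents : List (List Int)) (sent_id : Int) (sent_pos_id : Int) : Int × Int :=
  match sents with
  | [] => (sent_id, sent_pos_id)
  | sent :: rest =>
    if sent_pos_id ≥ (sent.length : Int) then
      pos2sents_id_go rest (sent_id + 1) (sent_pos_id - (sent.length : Int))
    else
      (sent_id, sent_pos_id)

def pos2sents_id (sents : List (List Int)) (pos_id : Int) : Int × Int :=
  pos2sents_id_go sents 0 pos_id

-- ===== PORT B =====
-- the prefix-sum building loop of B: P = [0, l0, l0+l1, …], built with the running sum as accumulator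
def pvPrefix (sents : List (List Int)) (acc : Int) : List Int :=
  match sents with
  | [] => [acc]
  | s :: rest => acc :: pvPrefix rest (acc + (s.length : Int))

-- the while-loop of B: bisect_right on P between lo and hi
def pvBisect (P : List Int) (x : Int) (lo hi : Nat) : Nat :=
  if h : lo < hi then
    let mid := (lo + hi) / 2
    if x < P.getD mid 0 then pvBisect P x lo mid else pvBisect P x (mid + 1) hi
  else lo
termination_by hi - lo
decreasing_by all_goals omega

def pos2sents_id_alt (sents : List (List Int)) (pos_id : Int) : Int × Int :=
  let P := pvPrefix sents 0
  let lo := pvBisect P pos_id 0 P.length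
  let idx : Int := max ((lo : Int) - 1) 0
  (idx, pos_id - P.getD idx.toNat 0)

-- ===== PRECONDITION & SPEC =====
def Spec_pos2sents_id (sents : List (List Int)) (pos_id : Int) (out : Int × Int) : Prop := out = pos2sents_id_alt sents pos_id
instance (sents : List (List Int)) (pos_id : Int) (out : Int × Int) : Decidable (Spec_pos2sents_id sents pos_id out) := by unfold Spec_pos2sents_id; infer_instance

-- ===== CLAIM (what is proved, stated in full; the proofs are below) =====
def Claim_equal_pos2sents_id : Prop := ∀ (sents : List (List Int)) (pos_id : Int), Dom_pos2sents_id sents pos_id → Spec_pos2sents_id sents pos_id (pos2sents_id sents pos_id)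

-- ===== LEMMAS AND PROOFS =====

-- shape of the prefix list
lemma pvPrefix_length (sents : List (List Int)) (acc : Int) :
    (pvPrefix sents acc).length = sents.length + 1 := by
  induction sents generalizing acc with
  | nil => simp [pvPrefix]
  | cons s rest ih => simp [pvPrefix, ih]

lemma pvPrefix_getD_zero (sents : List (List Int)) (acc : Int) :
    (pvPrefix sents acc).getD 0 0 = acc := by
  cases sents <;> simp [pvPrefix]

-- shifting the accumulator shifts every in-range entry
lemma pvPrefix_getD_shift (sents : List (List Int)) (acc c : Int) (i : Nat)
    (hi : i ≤ sents.length) :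
    (pvPrefix sents (acc + c)).getD i 0 = c + (pvPrefix sents acc).getD i 0 := by
  induction sents generalizing acc i with
  | nil =>
    have h0 : i = 0 := by simpa using hi
    subst h0; simp [pvPrefix]; ring
  | cons s rest ih =>
    cases i with
    | zero => simp [pvPrefix]; ring
    | succ j =>
      have := ih (acc + (s.length : Int)) j (by simpa using hi)
      simp [pvPrefix]
      calc (pvPrefix rest (acc + c + (s.length : Int))).getD j 0
          = (pvPrefix rest (acc + (s.length : Int) + c)).getD j 0 := by ring_nf
        _ = c + (pvPrefix rest (acc + (s.length : Int))).getD j 0 := this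

-- convenient form of the shift lemma at accumulator 0
lemma pvPrefix_getD_shift0 (sents : List (List Int)) (c : Int) (i : Nat)
    (hi : i ≤ sents.length) :
    (pvPrefix sents c).getD i 0 = c + (pvPrefix sents 0).getD i 0 := by
  have := pvPrefix_getD_shift sents 0 c i hi
  simpa using this

-- prefix sums are monotone (all sentence lengths are ≥ 0)
lemma pvPrefix_mono (sents : List (List Int)) (acc : Int) (i j : Nat)
    (hij : i ≤ j) (hj : j ≤ sents.length) :
    (pvPrefix sents acc).getD i 0 ≤ (pvPrefix sents acc).getD j 0 := by
  induction sents generalizing acc i j with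
  | nil =>
    have hj0 : j = 0 := by simpa using hj
    have hi0 : i = 0 := by omega
    subst hj0; subst hi0; simp
  | cons s rest ih =>
    cases j with
    | zero =>
      have hi0 : i = 0 := by omega
      subst hi0; simp
    | succ j' =>
      cases i with
      | succ i' =>
        simpa [pvPrefix] using ih (acc + (s.length : Int)) i' j' (by omega) (by simpa using hj)
      | zero =>
        have h1 : acc ≤ (pvPrefix rest (acc + (s.length : Int))).getD 0 0 := by
          rw [pvPrefix_getD_zero]; omega
        have h2 := ih (acc + (s.length : Int)) 0 j' (by omega) (by simpa using hj)
        simp [pvPrefix]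
        exact le_trans h1 h2

-- correctness of the binary search: the result r separates "≤ x" from "> x"
lemma pvBisect_spec (P : List Int) (x : Int)
    (hs : ∀ i j, i ≤ j → j < P.length → P.getD i 0 ≤ P.getD j 0) :
    ∀ lo hi, lo ≤ hi → hi ≤ P.length →
    (∀ i, i < lo → P.getD i 0 ≤ x) →
    (∀ i, hi ≤ i → i < P.length → x < P.getD i 0) →
    lo ≤ pvBisect P x lo hi ∧ pvBisect P x lo hi ≤ hi ∧
    (∀ i, i < pvBisect P x lo hi → P.getD i 0 ≤ x) ∧
    (∀ i, pvBisect P x lo hi ≤ i → i < P.length → x < P.getD i 0) := by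
  intro lo hi
  induction hfuel : hi - lo using Nat.strong_induction_on generalizing lo hi with
  | _ fuel ih =>
  intro hlohi hhi inv1 inv2
  rw [pvBisect]
  by_cases h : lo < hi
  · simp only [h, dif_pos]
    by_cases hx : x < P.getD ((lo + hi) / 2) 0
    · simp only [hx, if_pos]
      have := ih ((lo + hi) / 2 - lo) (by omega) lo ((lo + hi) / 2) rfl (by omega) (by omega) inv1
        (fun i hi1 hi2 => lt_of_lt_of_le hx (hs ((lo + hi) / 2) i hi1 hi2))
      exact ⟨this.1, le_trans this.2.1 (by omega), this.2.2⟩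
    · simp only [hx, if_false]
      have hx' : P.getD ((lo + hi) / 2) 0 ≤ x := not_lt.mp hx
      have := ih (hi - ((lo + hi) / 2 + 1)) (by omega) ((lo + hi) / 2 + 1) hi rfl (by omega) hhi
        (fun i hi1 => le_trans (hs i ((lo + hi) / 2) (by omega) (by omega)) hx') inv2
      exact ⟨le_trans (by omega) this.1, this.2⟩
  · simp only [h, dif_neg, not_false_iff]
    exact ⟨le_refl lo, hlohi, inv1, fun i h1 h2 => inv2 i (by omega) h2⟩

-- the separating point is unique
lemma sep_unique (P : List Int) (x : Int) (r1 r2 : Nat)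
    (h1a : ∀ i, i < r1 → P.getD i 0 ≤ x) (h1b : ∀ i, r1 ≤ i → i < P.length → x < P.getD i 0)
    (h2a : ∀ i, i < r2 → P.getD i 0 ≤ x) (h2b : ∀ i, r2 ≤ i → i < P.length → x < P.getD i 0)
    (hr1 : r1 ≤ P.length) (hr2 : r2 ≤ P.length) : r1 = r2 := by
  by_contra hne
  rcases Nat.lt_or_ge r1 r2 with h | h
  · exact absurd (h2a r1 h) (not_le.mpr (h1b r1 (le_refl _) (by omega)))
  · have h' : r2 < r1 := by omega
    exact absurd (h1a r2 h') (not_le.mpr (h2b r2 (le_refl _) (by omega)))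

-- the bisect result on the prefix list, characterized
def pvR (sents : List (List Int)) (x : Int) : Nat :=
  pvBisect (pvPrefix sents 0) x 0 (pvPrefix sents 0).length

lemma pvR_spec (sents : List (List Int)) (x : Int) :
    pvR sents x ≤ sents.length + 1 ∧
    (∀ i, i < pvR sents x → (pvPrefix sents 0).getD i 0 ≤ x) ∧
    (∀ i, pvR sents x ≤ i → i ≤ sents.length → x < (pvPrefix sents 0).getD i 0) := by
  have hlen := pvPrefix_length sents 0
  have hs : ∀ i j, i ≤ j → j < (pvPrefix sents 0).length →
      (pvPrefix sents 0).getD i 0 ≤ (pvPrefix sents 0).getD j 0 := by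
    intro i j hij hj
    exact pvPrefix_mono sents 0 i j hij (by omega)
  have H := pvBisect_spec (pvPrefix sents 0) x hs 0 (pvPrefix sents 0).length
    (Nat.zero_le _) (le_refl _) (by omega) (fun i h1 h2 => absurd h2 (not_lt.mpr h1))
  unfold pvR
  exact ⟨hlen ▸ H.2.1, H.2.2.1, fun i h1 h2 => H.2.2.2 i h1 (by omega)⟩

lemma pvR_eq (sents : List (List Int)) (x : Int) (r : Nat)
    (hr : r ≤ sents.length + 1)
    (ha : ∀ i, i < r → (pvPrefix sents 0).getD i 0 ≤ x)
    (hb : ∀ i, r ≤ i → i ≤ sents.length → x < (pvPrefix sents 0).getD i 0) :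
    pvR sents x = r := by
  have hspec := pvR_spec sents x
  have hlen := pvPrefix_length sents 0
  exact sep_unique (pvPrefix sents 0) x (pvR sents x) r
    hspec.2.1 (fun i h1 h2 => hspec.2.2 i h1 (by omega))
    ha (fun i h1 h2 => hb i h1 (by omega))
    (by omega) (by omega)

-- pvR on a cons, case pos ≥ len: it is one more than pvR on the tail
lemma pvR_cons_ge (s : List Int) (rest : List (List Int)) (x : Int)
    (hx : (s.length : Int) ≤ x) :
    pvR (s :: rest) x = pvR rest (x - (s.length : Int)) + 1 := by
  have hspec := pvR_spec rest (x - (s.length : Int))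
  apply pvR_eq
  · simpa using hspec.1
  · intro i hi
    cases i with
    | zero => simp [pvPrefix]; omega
    | succ j =>
      have h1 := hspec.2.1 j (by omega)
      have hj : j ≤ rest.length := by have := hspec.1; omega
      have hsh := pvPrefix_getD_shift0 rest (s.length : Int) j hj
      simp only [pvPrefix, List.getD_cons_succ, zero_add]
      rw [hsh]; omega
  · intro i h1 h2
    cases i with
    | zero => omega
    | succ j =>
      have hb := hspec.2.2 j (by omega) (by simpa using h2)
      have hj : j ≤ rest.length := by simpa using h2
      have hsh := pvPrefix_getD_shift0 rest (s.length : Int) j hj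
      simp only [pvPrefix, List.getD_cons_succ, zero_add]
      rw [hsh]; omega

-- pvR on a cons, case 0 ≤ pos < len: it is 1
lemma pvR_cons_mid (s : List Int) (rest : List (List Int)) (x : Int)
    (hx0 : 0 ≤ x) (hxl : x < (s.length : Int)) :
    pvR (s :: rest) x = 1 := by
  apply pvR_eq
  · omega
  · intro i hi
    have h0 : i = 0 := by omega
    subst h0
    simp [pvPrefix]; omega
  · intro i h1 h2
    cases i with
    | zero => omega
    | succ j =>
      have hj : j ≤ rest.length := by simpa using h2
      have hnn : (0 : Int) ≤ (pvPrefix rest 0).getD j 0 := by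
        have := pvPrefix_mono rest 0 0 j (Nat.zero_le _) hj
        rwa [pvPrefix_getD_zero] at this
      have hsh := pvPrefix_getD_shift0 rest (s.length : Int) j hj
      simp only [pvPrefix, List.getD_cons_succ, zero_add]
      rw [hsh]; omega

-- pvR when pos < 0: it is 0
lemma pvR_neg (sents : List (List Int)) (x : Int) (hx : x < 0) :
    pvR sents x = 0 := by
  apply pvR_eq
  · omega
  · intro i hi; omega
  · intro i h1 h2
    have hnn : (0 : Int) ≤ (pvPrefix sents 0).getD i 0 := by
      have := pvPrefix_mono sents 0 0 i (Nat.zero_le _) h2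
      rwa [pvPrefix_getD_zero] at this
    omega

-- pvR is at least 1 when pos ≥ 0 (P[0] = 0 ≤ pos)
lemma pvR_pos (sents : List (List Int)) (x : Int) (hx : 0 ≤ x) : 1 ≤ pvR sents x := by
  have hspec := pvR_spec sents x
  by_contra h
  have h0 : pvR sents x = 0 := by omega
  have := hspec.2.2 0 (by omega) (Nat.zero_le _)
  rw [pvPrefix_getD_zero] at this
  omega

-- B unfolded through pvR
lemma alt_eq (sents : List (List Int)) (x : Int) :
    pos2sents_id_alt sents x =
      (max ((pvR sents x : Int) - 1) 0,
       x - (pvPrefix sents 0).getD (max ((pvR sents x : Int) - 1) 0).toNat 0) := by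
  simp only [pos2sents_id_alt, pvR]

-- shifting A's sent_id accumulator
lemma go_shift (sents : List (List Int)) (i p : Int) :
    pos2sents_id_go sents i p =
      ((pos2sents_id_go sents 0 p).1 + i, (pos2sents_id_go sents 0 p).2) := by
  induction sents generalizing i p with
  | nil => simp [pos2sents_id_go]
  | cons s rest ih =>
    by_cases h : p ≥ (s.length : Int)
    · simp only [pos2sents_id_go, h, if_pos]
      rw [ih (i + 1), ih (0 + 1)]
      simp only [Prod.mk.injEq]
      exact ⟨by ring, trivial⟩
    · simp [pos2sents_id_go, h]

-- main equality, by induction on sents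
lemma main_eq (sents : List (List Int)) (x : Int) :
    pos2sents_id sents x = pos2sents_id_alt sents x := by
  induction sents generalizing x with
  | nil =>
    rw [alt_eq]
    by_cases hx : 0 ≤ x
    · have h1 : pvR [] x = 1 := by
        apply pvR_eq
        · omega
        · intro i hi
          have h0 : i = 0 := by omega
          subst h0; simp [pvPrefix]; omega
        · intro i h1 h2
          simp only [List.length_nil] at h2
          omega
      simp [pos2sents_id, pos2sents_id_go, h1, pvPrefix]
    · have h0 : pvR [] x = 0 := pvR_neg [] x (by omega)
      simp [pos2sents_id, pos2sents_id_go, h0, pvPrefix]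
  | cons s rest ih =>
    by_cases h : x ≥ (s.length : Int)
    · have hge := pvR_cons_ge s rest x h
      have hpos : 1 ≤ pvR rest (x - (s.length : Int)) := pvR_pos _ _ (by omega)
      rw [alt_eq]
      simp only [pos2sents_id, pos2sents_id_go, h, if_pos]
      rw [go_shift, show pos2sents_id_go rest 0 (x - (s.length : Int)) =
        pos2sents_id rest (x - (s.length : Int)) from rfl, ih, alt_eq, hge]
      have hmax1 : max ((pvR rest (x - (s.length : Int)) : Int) - 1) 0 =
          (pvR rest (x - (s.length : Int)) : Int) - 1 := by omega
      have hmax2 : max (((pvR rest (x - (s.length : Int)) + 1 : Nat) : Int) - 1) 0 =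
          (pvR rest (x - (s.length : Int)) : Int) := by push_cast; omega
      rw [hmax1, hmax2]
      simp only [Prod.mk.injEq]
      constructor
      · omega
      · have htn1 : ((pvR rest (x - (s.length : Int)) : Int) - 1).toNat =
            pvR rest (x - (s.length : Int)) - 1 := by omega
        have htn2 : ((pvR rest (x - (s.length : Int)) : Int)).toNat =
            pvR rest (x - (s.length : Int)) := by omega
        rw [htn1, htn2]
        have hstep : pvR rest (x - (s.length : Int)) =
            (pvR rest (x - (s.length : Int)) - 1) + 1 := by omega
        have hj : pvR rest (x - (s.length : Int)) - 1 ≤ rest.length := by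
          have := (pvR_spec rest (x - (s.length : Int))).1; omega
        have hcons : (pvPrefix (s :: rest) 0).getD (pvR rest (x - (s.length : Int))) 0 =
            (s.length : Int) + (pvPrefix rest 0).getD (pvR rest (x - (s.length : Int)) - 1) 0 := by
          rw [hstep]
          simp only [pvPrefix, List.getD_cons_succ, zero_add]
          exact pvPrefix_getD_shift0 rest (s.length : Int) _ hj
        rw [hcons]; ring
    · rw [alt_eq]
      by_cases hx0 : 0 ≤ x
      · have h1 := pvR_cons_mid s rest x hx0 (by omega)
        simp [pos2sents_id, pos2sents_id_go, h, h1, pvPrefix]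
      · have h0 := pvR_neg (s :: rest) x (by omega)
        simp [pos2sents_id, pos2sents_id_go, h, h0, pvPrefix]

-- ===== VERDICT (by name: the statement is the Claim_ definition above) =====
theorem pos2sents_id_spec : Claim_equal_pos2sents_id := by
  intro sents pos_id _
  unfold Spec_pos2sents_id
  exact main_eq sents pos_id
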